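-- pv_equiv track=rewrite | github.com/xinyili0603/Big_Co_Team_9 | src/relation_extraction.py | build_activates_triples
-- ===== SOURCE A (Python) =====
-- from collections import Counter, defaultdict
--
-- ACTIVATION_TRIGGERS = (
--     "activates",
--     "activation",
--     "activation of",
--     "induces",
--     "triggers",
--     "stimulates",
-- )
--
-- def group_entities_by_sentence(entities: list[dict], valid_document_ids: set[str]) -> dict[tuple[str, str], list[dict]]:
--     """Group cleaned entities by document and exact sentence."""
--     entities_by_sentence: dict[tuple[str, str], list[dict]] = defaultdict(list)
--
--     for entity in entities:
--         document_id = str(entity.get("document_id", "")).strip()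
--         sentence = str(entity.get("sentence", "")).strip()
--         if not document_id or document_id not in valid_document_ids or not sentence:
--             continue
--         entities_by_sentence[(document_id, sentence)].append(entity)
--
--     return entities_by_sentence
--
-- def sentence_has_activation_trigger(sentence: str) -> bool:
--     """Return True when a sentence contains a conservative activation cue."""
--     normalized_sentence = sentence.lower()
--     return any(trigger in normalized_sentence for trigger in ACTIVATION_TRIGGERS)
--
-- def find_trigger_position(sentence: str, triggers: tuple[str, ...]) -> int:
--     """Return the earliest trigger position, or -1 if none is present."""
--     normalized_sentence = sentence.lower()
--     positions = [normalized_sentence.find(trigger) for trigger in triggers if trigger in normalized_sentence]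
--     return min(positions) if positions else -1
--
-- def build_activates_triples(entities: list[dict], valid_document_ids: set[str]) -> tuple[list[dict], int]:
--     """Create PROTEIN -> ACTIVATES -> PROTEIN triples from same-sentence cues."""
--     entities_by_sentence = group_entities_by_sentence(entities, valid_document_ids)
--     triples: list[dict] = []
--     candidate_count = 0
--
--     for (document_id, sentence), sentence_entities in entities_by_sentence.items():
--         if not sentence_has_activation_trigger(sentence):
--             continue
--
--         proteins = [entity for entity in sentence_entities if entity["type"] == "protein"]
--         if len(proteins) < 2 or len(proteins) > 3:
--             continue
--
--         normalized_sentence = sentence.lower()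
--         trigger_pos = find_trigger_position(sentence, ACTIVATION_TRIGGERS)
--         if trigger_pos == -1:
--             continue
--
--         candidate_count += len(proteins) * (len(proteins) - 1)
--         before = [
--             entity
--             for entity in proteins
--             if normalized_sentence.find(entity["name"].lower()) != -1
--             and normalized_sentence.find(entity["name"].lower()) < trigger_pos
--         ]
--         after = [
--             entity
--             for entity in proteins
--             if normalized_sentence.find(entity["name"].lower()) != -1
--             and normalized_sentence.find(entity["name"].lower()) > trigger_pos
--         ]
--
--         subject = None
--         object_ = None
--         if before and after:
--             subject = max(before, key=lambda entity: normalized_sentence.find(entity["name"].lower()))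
--             object_ = min(after, key=lambda entity: normalized_sentence.find(entity["name"].lower()))
--
--         if not subject or not object_:
--             continue
--
--         triples.append(
--             {
--                 "subject_id": subject["entity_id"],
--                 "predicate": "ACTIVATES",
--                 "object_id": object_["entity_id"],
--                 "source_sentence": sentence,
--                 "document_id": document_id,
--             }
--         )
--
--     return triples, candidate_count
-- ===== SOURCE B (Python) =====
-- ACTIVATION_TRIGGERS = (
--     "activates",
--     "activation",
--     "activation of",
--     "induces",
--     "triggers",
--     "stimulates",
-- )
--
-- def find_trigger_position(sentence, triggers):
--     """Return the earliest trigger position, or -1 if none is present."""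
--     normalized_sentence = sentence.lower()
--     positions = [normalized_sentence.find(t) for t in triggers if t in normalized_sentence]
--     return min(positions) if positions else -1
--
-- def build_activates_triples(entities, valid_document_ids):
--     """Create PROTEIN -> ACTIVATES -> PROTEIN triples from same-sentence cues.
--
--     Flat two-pass variant: no dict-of-lists grouping — collect the usable
--     (document_id, sentence, entity) rows once, then iterate the distinct
--     (document_id, sentence) keys in first-seen order, re-selecting each
--     sentence's rows by filtering.  Per sentence the pair is chosen as the
--     protein NEAREST the activation cue on each side (min by distance to the
--     cue), instead of before/after candidate lists with max()/min().
--     """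
--     rows = []
--     for entity in entities:
--         document_id = str(entity.get("document_id", "")).strip()
--         sentence = str(entity.get("sentence", "")).strip()
--         if document_id and document_id in valid_document_ids and sentence:
--             rows.append((document_id, sentence, entity))
--
--     triples = []
--     candidate_count = 0
--     for document_id, sentence in dict.fromkeys((r[0], r[1]) for r in rows):
--         trigger_pos = find_trigger_position(sentence, ACTIVATION_TRIGGERS)
--         if trigger_pos == -1:  # no activation cue in this sentence
--             continue
--         proteins = [r[2] for r in rows
--                     if (r[0], r[1]) == (document_id, sentence)
--                     and r[2]["type"] == "protein"]
--         if not (2 <= len(proteins) <= 3):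
--             continue
--         candidate_count += len(proteins) * (len(proteins) - 1)
--
--         normalized_sentence = sentence.lower()
--         positions = [(e, normalized_sentence.find(e["name"].lower())) for e in proteins]
--         pairs = [ep for ep in positions if ep[1] != -1]
--         subject = min((ep for ep in pairs if ep[1] < trigger_pos),
--                       key=lambda ep: trigger_pos - ep[1], default=None)
--         object_ = min((ep for ep in pairs if ep[1] > trigger_pos),
--                       key=lambda ep: ep[1] - trigger_pos, default=None)
--         if subject is None or object_ is None:
--             continue
--
--         triples.append(
--             {
--                 "subject_id": subject[0]["entity_id"],
--                 "predicate": "ACTIVATES",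
--                 "object_id": object_[0]["entity_id"],
--                 "source_sentence": sentence,
--                 "document_id": document_id,
--             }
--         )
--
--     return triples, candidate_count
-- ===== Notes on version B (the rewrite author's own statement) =====
-- stated objective: alternative
-- what changed: B eliminates the dict-of-lists grouping and the before/after candidate lists: it collects usable (doc, sentence, entity) rows in one flat pass, iterates the distinct keys (dict.fromkeys) re-selecting each sentence's proteins by filtering the row list, drops the redundant has-trigger pre-check (trigger_pos == -1 subsumes it), and picks subject/object as the protein nearest the cue on each side via min-by-distance over precomputed positions instead of max()/min() over filtered lists.
import Mathlib
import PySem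

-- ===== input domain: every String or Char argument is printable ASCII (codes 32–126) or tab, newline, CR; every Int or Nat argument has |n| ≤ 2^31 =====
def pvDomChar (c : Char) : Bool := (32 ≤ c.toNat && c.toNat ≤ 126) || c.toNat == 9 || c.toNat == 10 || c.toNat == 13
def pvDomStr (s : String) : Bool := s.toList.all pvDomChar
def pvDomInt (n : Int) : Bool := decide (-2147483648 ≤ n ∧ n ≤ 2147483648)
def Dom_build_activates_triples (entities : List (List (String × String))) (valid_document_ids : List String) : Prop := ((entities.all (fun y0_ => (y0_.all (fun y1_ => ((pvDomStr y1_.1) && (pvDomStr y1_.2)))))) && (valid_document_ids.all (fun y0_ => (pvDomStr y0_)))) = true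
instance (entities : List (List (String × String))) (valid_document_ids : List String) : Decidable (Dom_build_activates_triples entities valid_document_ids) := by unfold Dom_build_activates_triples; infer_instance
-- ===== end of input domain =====

-- B drops the dict-of-lists grouping (flat row list + first-seen distinct keys + per-key filtering)
-- and picks each sentence's pair as the protein nearest the cue on each side (min by distance)
-- instead of before/after lists with max()/min() (objective: alternative; return value only).

-- ===== helpers shared by both ports (module-level constants/helpers of the Python file) =====

def pvTriggers : List String :=
  ["activates", "activation", "activation of", "induces", "triggers", "stimulates"]

-- entity.get(k, "") — first-match association-list lookup (dict convention)
def pvDGet (e : List (String × String)) (k : String) : String :=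
  ((PySem.Dict.mk e).get? k).getD ""

def pvTriggerPos (sentence : String) : Int :=
  match PySem.List.min? ((pvTriggers.filter
      (fun t => PySem.Str.isIn t (PySem.Str.lower sentence))).map
      (fun t => PySem.Str.find (PySem.Str.lower sentence) t)) (fun x => x) with
  | some m => m
  | none => -1

def pvTriple (subject object : List (String × String)) (document_id sentence : String) :
    List (String × String) :=
  [("subject_id", pvDGet subject "entity_id"), ("predicate", "ACTIVATES"),
   ("object_id", pvDGet object "entity_id"), ("source_sentence", sentence),
   ("document_id", document_id)]

-- ===== PORT A =====

def pvHasTrigger (sentence : String) : Bool :=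
  pvTriggers.any (fun t => PySem.Str.isIn t (PySem.Str.lower sentence))

def pvGroup (entities : List (List (String × String))) (valid_document_ids : List String) :
    PySem.Dict (String × String) (List (List (String × String))) :=
  entities.foldl (fun d e =>
    if PySem.Str.strip (pvDGet e "document_id") = "" ∨
        ¬ valid_document_ids.contains (PySem.Str.strip (pvDGet e "document_id")) = true ∨
        PySem.Str.strip (pvDGet e "sentence") = "" then d
    else d.modify (PySem.Str.strip (pvDGet e "document_id"), PySem.Str.strip (pvDGet e "sentence"))
      [] (· ++ [e])) PySem.Dict.empty

def pvStepA (st : List (List (String × String)) × Int)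
    (item : (String × String) × List (List (String × String))) :
    List (List (String × String)) × Int :=
  let document_id := item.1.1
  let sentence := item.1.2
  if ¬ pvHasTrigger sentence then st else
  let proteins := item.2.filter (fun e => pvDGet e "type" == "protein")
  if proteins.length < 2 ∨ proteins.length > 3 then st else
  let ns := PySem.Str.lower sentence
  let trigger_pos := pvTriggerPos sentence
  if trigger_pos = -1 then st else
  let cc := st.2 + (proteins.length : Int) * ((proteins.length : Int) - 1)
  let pos := fun e => PySem.Str.find ns (PySem.Str.lower (pvDGet e "name"))
  let before := proteins.filter (fun e => decide (pos e ≠ -1 ∧ pos e < trigger_pos))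
  let after := proteins.filter (fun e => decide (pos e ≠ -1 ∧ pos e > trigger_pos))
  let subject := if before ≠ [] ∧ after ≠ [] then PySem.List.max? before pos else none
  let object := if before ≠ [] ∧ after ≠ [] then PySem.List.min? after pos else none
  match subject, object with
  | some s, some o => (st.1 ++ [pvTriple s o document_id sentence], cc)
  | _, _ => (st.1, cc)

def build_activates_triples (entities : List (List (String × String))) (valid_document_ids : List String) : (List (List (String × String))) × Int :=
  (pvGroup entities valid_document_ids).items.foldl pvStepA ([], 0)

-- ===== PORT B =====

-- the usable (document_id, sentence, entity) rows, collected once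
def pvRows (entities : List (List (String × String))) (valid_document_ids : List String) :
    List (String × String × List (String × String)) :=
  entities.foldl (fun acc e =>
    if PySem.Str.strip (pvDGet e "document_id") ≠ "" ∧
        valid_document_ids.contains (PySem.Str.strip (pvDGet e "document_id")) = true ∧
        PySem.Str.strip (pvDGet e "sentence") ≠ ""
    then acc ++ [(PySem.Str.strip (pvDGet e "document_id"), PySem.Str.strip (pvDGet e "sentence"), e)]
    else acc) []

def pvStepB (rows : List (String × String × List (String × String)))
    (st : List (List (String × String)) × Int) (k : String × String) :
    List (List (String × String)) × Int :=
  let document_id := k.1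
  let sentence := k.2
  let trigger_pos := pvTriggerPos sentence
  if trigger_pos = -1 then st else
  let proteins := (rows.filter (fun r =>
    ((r.1, r.2.1) == k) && (pvDGet r.2.2 "type" == "protein"))).map (fun r => r.2.2)
  if proteins.length < 2 ∨ proteins.length > 3 then st else
  let cc := st.2 + (proteins.length : Int) * ((proteins.length : Int) - 1)
  let ns := PySem.Str.lower sentence
  let positions := proteins.map (fun e => (e, PySem.Str.find ns (PySem.Str.lower (pvDGet e "name"))))
  let pairs := positions.filter (fun ep => decide (ep.2 ≠ -1))
  let subject := PySem.List.min? (pairs.filter (fun ep => decide (ep.2 < trigger_pos)))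
    (fun ep => trigger_pos - ep.2)
  let object := PySem.List.min? (pairs.filter (fun ep => decide (ep.2 > trigger_pos)))
    (fun ep => ep.2 - trigger_pos)
  match subject, object with
  | some s, some o => (st.1 ++ [pvTriple s.1 o.1 document_id sentence], cc)
  | _, _ => (st.1, cc)

def build_activates_triples_alt (entities : List (List (String × String))) (valid_document_ids : List String) : (List (List (String × String))) × Int :=
  let rows := pvRows entities valid_document_ids
  (PySem.List.dedup (rows.map (fun r => (r.1, r.2.1)))).foldl (pvStepB rows) ([], 0)

-- ===== PRECONDITION & SPEC =====

-- Pre_ excludes the inputs where A raises KeyError: an entity whose cleaned document id is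
-- nonempty and valid and whose cleaned sentence is nonempty and carries an activation cue
-- must have a "type" key, and additionally "name"/"entity_id" keys when its type is "protein";
-- this mildly over-excludes, since A reads "name"/"entity_id" only in sentences with 2-3 proteins.
def Pre_build_activates_triples (entities : List (List (String × String))) (valid_document_ids : List String) : Prop :=
  ∀ e ∈ entities,
    (PySem.Str.strip (pvDGet e "document_id") ≠ "" ∧
     valid_document_ids.contains (PySem.Str.strip (pvDGet e "document_id")) = true ∧
     PySem.Str.strip (pvDGet e "sentence") ≠ "" ∧
     pvHasTrigger (PySem.Str.strip (pvDGet e "sentence")) = true) →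
    ((PySem.Dict.mk e).get? "type").isSome = true ∧
    (pvDGet e "type" = "protein" →
      ((PySem.Dict.mk e).get? "name").isSome = true ∧
      ((PySem.Dict.mk e).get? "entity_id").isSome = true)

instance (entities : List (List (String × String))) (valid_document_ids : List String) : Decidable (Pre_build_activates_triples entities valid_document_ids) := by unfold Pre_build_activates_triples; infer_instance

def pvWitness_build_activates_triples : (List (List (String × String))) × List String :=
  ([[("document_id", "d1"), ("sentence", "A activates B"), ("type", "protein"), ("name", "A"), ("entity_id", "p1")],
    [("document_id", "d1"), ("sentence", "A activates B"), ("type", "protein"), ("name", "B"), ("entity_id", "p2")]],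
   ["d1"])

def Spec_build_activates_triples (entities : List (List (String × String))) (valid_document_ids : List String) (out : (List (List (String × String))) × Int) : Prop := out = build_activates_triples_alt entities valid_document_ids
instance (entities : List (List (String × String))) (valid_document_ids : List String) (out : (List (List (String × String))) × Int) : Decidable (Spec_build_activates_triples entities valid_document_ids out) := by unfold Spec_build_activates_triples; infer_instance

-- ===== CLAIM (what is proved, stated in full; the proofs are below) =====
def Claim_equal_build_activates_triples : Prop := ∀ (entities : List (List (String × String))) (valid_document_ids : List String), Dom_build_activates_triples entities valid_document_ids → Pre_build_activates_triples entities valid_document_ids → Spec_build_activates_triples entities valid_document_ids (build_activates_triples entities valid_document_ids)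

-- ===== LEMMAS AND PROOFS =====

-- the usable rows as one filterMap (proof-side normal form of both sides' first pass)
def pvRowsOf (entities : List (List (String × String))) (valid_document_ids : List String) :
    List (String × String × List (String × String)) :=
  entities.filterMap (fun e =>
    if PySem.Str.strip (pvDGet e "document_id") ≠ "" ∧
        valid_document_ids.contains (PySem.Str.strip (pvDGet e "document_id")) = true ∧
        PySem.Str.strip (pvDGet e "sentence") ≠ ""
    then some (PySem.Str.strip (pvDGet e "document_id"), PySem.Str.strip (pvDGet e "sentence"), e)
    else none)

theorem pvRows_eq_rowsOf_aux (entities : List (List (String × String))) (valid_document_ids : List String)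
    (acc : List (String × String × List (String × String))) :
    entities.foldl (fun acc e =>
      if PySem.Str.strip (pvDGet e "document_id") ≠ "" ∧
          valid_document_ids.contains (PySem.Str.strip (pvDGet e "document_id")) = true ∧
          PySem.Str.strip (pvDGet e "sentence") ≠ ""
      then acc ++ [(PySem.Str.strip (pvDGet e "document_id"), PySem.Str.strip (pvDGet e "sentence"), e)]
      else acc) acc
    = acc ++ pvRowsOf entities valid_document_ids := by
  induction entities generalizing acc with
  | nil => simp [pvRowsOf]
  | cons e t ih =>
    simp only [List.foldl_cons]
    rw [ih]
    unfold pvRowsOf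
    rw [List.filterMap_cons]
    by_cases h : PySem.Str.strip (pvDGet e "document_id") ≠ "" ∧
        valid_document_ids.contains (PySem.Str.strip (pvDGet e "document_id")) = true ∧
        PySem.Str.strip (pvDGet e "sentence") ≠ ""
    · rw [if_pos h, if_pos h, List.append_assoc, List.singleton_append]
    · rw [if_neg h, if_neg h]

theorem pvRows_eq_rowsOf (entities : List (List (String × String))) (valid_document_ids : List String) :
    pvRows entities valid_document_ids = pvRowsOf entities valid_document_ids := by
  unfold pvRows
  simpa using pvRows_eq_rowsOf_aux entities valid_document_ids []

-- A's grouping fold is the modify-append fold over the usable rows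
theorem pvGroup_eq_fold_rows (entities : List (List (String × String))) (valid_document_ids : List String)
    (d : PySem.Dict (String × String) (List (List (String × String)))) :
    entities.foldl (fun d e =>
      if PySem.Str.strip (pvDGet e "document_id") = "" ∨
          ¬ valid_document_ids.contains (PySem.Str.strip (pvDGet e "document_id")) = true ∨
          PySem.Str.strip (pvDGet e "sentence") = "" then d
      else d.modify (PySem.Str.strip (pvDGet e "document_id"), PySem.Str.strip (pvDGet e "sentence"))
        [] (· ++ [e])) d
    = (pvRowsOf entities valid_document_ids).foldl
        (fun d r => d.modify (r.1, r.2.1) [] (· ++ [r.2.2])) d := by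
  induction entities generalizing d with
  | nil => simp [pvRowsOf]
  | cons e t ih =>
    simp only [List.foldl_cons]
    unfold pvRowsOf
    rw [List.filterMap_cons]
    by_cases h : PySem.Str.strip (pvDGet e "document_id") ≠ "" ∧
        valid_document_ids.contains (PySem.Str.strip (pvDGet e "document_id")) = true ∧
        PySem.Str.strip (pvDGet e "sentence") ≠ ""
    · have hne : ¬ (PySem.Str.strip (pvDGet e "document_id") = "" ∨
          ¬ valid_document_ids.contains (PySem.Str.strip (pvDGet e "document_id")) = true ∨
          PySem.Str.strip (pvDGet e "sentence") = "") := by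
        rintro (h1 | h2 | h3)
        · exact h.1 h1
        · exact h2 h.2.1
        · exact h.2.2 h3
      rw [if_neg hne, if_pos h]
      simp only [List.foldl_cons]
      exact ih _
    · have hor : PySem.Str.strip (pvDGet e "document_id") = "" ∨
          ¬ valid_document_ids.contains (PySem.Str.strip (pvDGet e "document_id")) = true ∨
          PySem.Str.strip (pvDGet e "sentence") = "" := by
        by_contra hc
        push_neg at hc
        exact h ⟨hc.1, hc.2.1, hc.2.2⟩
      rw [if_pos hor, if_neg h]
      exact ih d

-- min by (c - key) is max by key (first extremum wins on both sides)
theorem pvMinSubEqMax {α : Type} (l : List α) (f : α → Int) (c : Int) :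
    PySem.List.min? l (fun x => c - f x) = PySem.List.max? l f := by
  unfold PySem.List.min? PySem.List.max?
  congr 1
  funext acc x
  cases acc with
  | none => rfl
  | some m =>
    show (if c - f x < c - f m then some x else some m) = (if f m < f x then some x else some m)
    by_cases h : f m < f x
    · rw [if_pos (show c - f x < c - f m by omega), if_pos h]
    · rw [if_neg (show ¬ c - f x < c - f m by omega), if_neg h]

-- min by (key - c) is min by key
theorem pvMinSubEqMin {α : Type} (l : List α) (f : α → Int) (c : Int) :
    PySem.List.min? l (fun x => f x - c) = PySem.List.min? l f := by
  unfold PySem.List.min?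
  congr 1
  funext acc x
  cases acc with
  | none => rfl
  | some m =>
    show (if f x - c < f m - c then some x else some m) = (if f x < f m then some x else some m)
    by_cases h : f x < f m
    · rw [if_pos (show f x - c < f m - c by omega), if_pos h]
    · rw [if_neg (show ¬ f x - c < f m - c by omega), if_neg h]

-- min?/max? over a mapped list, with a key reading the mapped value
theorem pvMin?_map {α β : Type} (l : List α) (g : α → β) (key : β → Int) :
    PySem.List.min? (l.map g) key = (PySem.List.min? l (fun x => key (g x))).map g := by
  unfold PySem.List.min?
  rw [List.foldl_map]
  have main : ∀ (acc : Option α),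
      l.foldl (fun acc x =>
        match acc with
        | none => some (g x)
        | some m => if key (g x) < key m then some (g x) else some m) (acc.map g)
      = (l.foldl (fun acc x =>
          match acc with
          | none => some x
          | some m => if key (g x) < key (g m) then some x else some m) acc).map g := by
    intro acc
    induction l generalizing acc with
    | nil => rfl
    | cons x t ih =>
      cases acc with
      | none => simpa using ih (some x)
      | some m =>
        simp only [List.foldl_cons, Option.map_some]
        show t.foldl _ (if key (g x) < key (g m) then some (g x) else some (g m))
          = (t.foldl _ (if key (g x) < key (g m) then some x else some m)).map g
        by_cases h : key (g x) < key (g m)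
        · rw [if_pos h, if_pos h]
          simpa using ih (some x)
        · rw [if_neg h, if_neg h]
          simpa using ih (some m)
  have hcongr : (fun (acc : Option β) x =>
      match acc with
      | none => some (g x)
      | some m => if key (g x) < key m then some (g x) else some m)
    = (fun (acc : Option β) (x : α) =>
      match acc with
      | none => some (g x)
      | some m => if key (g x) < key m then some (g x) else some m) := rfl
  simpa using main none

-- no activation cue ↔ the earliest-trigger position is -1
theorem pvHasTrigger_iff (s : String) : pvHasTrigger s = true ↔ pvTriggerPos s ≠ -1 := by
  unfold pvHasTrigger pvTriggerPos
  constructor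
  · intro h hcon
    rcases List.any_eq_true.mp h with ⟨t, hmem, hin⟩
    have hfm : (PySem.Str.find (PySem.Str.lower s) t) ∈
        (pvTriggers.filter (fun t => PySem.Str.isIn t (PySem.Str.lower s))).map
          (fun t => PySem.Str.find (PySem.Str.lower s) t) :=
      List.mem_map.mpr ⟨t, List.mem_filter.mpr ⟨hmem, hin⟩, rfl⟩
    cases hm : PySem.List.min? ((pvTriggers.filter (fun t => PySem.Str.isIn t (PySem.Str.lower s))).map
        (fun t => PySem.Str.find (PySem.Str.lower s) t)) (fun x => x) with
    | none =>
      rw [PySem.List.min?_eq_none_iff] at hm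
      rw [hm] at hfm
      exact absurd hfm (List.not_mem_nil)
    | some m =>
      simp only [hm] at hcon
      have hmm := PySem.List.min?_mem hm
      simp only [List.mem_map, List.mem_filter] at hmm
      obtain ⟨t', ⟨-, hin'⟩, rfl⟩ := hmm
      have : 0 ≤ PySem.Str.find (PySem.Str.lower s) t' :=
        (PySem.Str.find_nonneg_iff _ _).mpr ((PySem.Str.isIn_iff_infix _ _).mp hin')
      omega
  · intro h
    by_contra hna
    have hall : ∀ t ∈ pvTriggers, ¬ PySem.Str.isIn t (PySem.Str.lower s) = true := by
      intro t hmem hin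
      exact hna (List.any_eq_true.mpr ⟨t, hmem, hin⟩)
    have hfil : pvTriggers.filter (fun t => PySem.Str.isIn t (PySem.Str.lower s)) = [] :=
      List.filter_eq_nil_iff.mpr hall
    apply h
    rw [hfil]
    rfl

-- selection tail: nearest-on-each-side min-by-distance over (entity, position) pairs
-- equals the guarded max?/min? over the before/after candidate lists
theorem pvTail_eq (st : List (List (String × String)) × Int)
    (proteins : List (List (String × String))) (pos : List (String × String) → Int)
    (tp cc : Int) (doc sent : String) :
    (match (if proteins.filter (fun e => decide (pos e ≠ -1 ∧ pos e < tp)) ≠ [] ∧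
              proteins.filter (fun e => decide (pos e ≠ -1 ∧ pos e > tp)) ≠ [] then
              PySem.List.max? (proteins.filter (fun e => decide (pos e ≠ -1 ∧ pos e < tp))) pos
            else none),
           (if proteins.filter (fun e => decide (pos e ≠ -1 ∧ pos e < tp)) ≠ [] ∧
              proteins.filter (fun e => decide (pos e ≠ -1 ∧ pos e > tp)) ≠ [] then
              PySem.List.min? (proteins.filter (fun e => decide (pos e ≠ -1 ∧ pos e > tp))) pos
            else none) with
     | some s, some o => (st.1 ++ [pvTriple s o doc sent], cc)
     | _, _ => (st.1, cc))
    = (match PySem.List.min? (((proteins.map (fun e => (e, pos e))).filter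
            (fun ep => decide (ep.2 ≠ -1))).filter (fun ep => decide (ep.2 < tp)))
            (fun ep => tp - ep.2),
           PySem.List.min? (((proteins.map (fun e => (e, pos e))).filter
            (fun ep => decide (ep.2 ≠ -1))).filter (fun ep => decide (ep.2 > tp)))
            (fun ep => ep.2 - tp) with
     | some s, some o => (st.1 ++ [pvTriple s.1 o.1 doc sent], cc)
     | _, _ => (st.1, cc)) := by
  have hbefore :
      ((proteins.map (fun e => (e, pos e))).filter (fun ep => decide (ep.2 ≠ -1))).filter
        (fun ep => decide (ep.2 < tp))
      = (proteins.filter (fun e => decide (pos e ≠ -1 ∧ pos e < tp))).map (fun e => (e, pos e)) := by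
    rw [List.filter_filter, List.filter_map]
    congr 1
    apply List.filter_congr
    intro e _
    simp [Bool.and_comm]
  have hafter :
      ((proteins.map (fun e => (e, pos e))).filter (fun ep => decide (ep.2 ≠ -1))).filter
        (fun ep => decide (ep.2 > tp))
      = (proteins.filter (fun e => decide (pos e ≠ -1 ∧ pos e > tp))).map (fun e => (e, pos e)) := by
    rw [List.filter_filter, List.filter_map]
    congr 1
    apply List.filter_congr
    intro e _
    simp [Bool.and_comm]
  rw [hbefore, hafter]
  have hsub : PySem.List.min? ((proteins.filter (fun e => decide (pos e ≠ -1 ∧ pos e < tp))).map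
        (fun e => (e, pos e))) (fun ep => tp - ep.2)
      = (PySem.List.max? (proteins.filter (fun e => decide (pos e ≠ -1 ∧ pos e < tp))) pos).map
          (fun e => (e, pos e)) := by
    rw [pvMin?_map]
    exact congrArg (Option.map _) (pvMinSubEqMax _ pos tp)
  have hobj : PySem.List.min? ((proteins.filter (fun e => decide (pos e ≠ -1 ∧ pos e > tp))).map
        (fun e => (e, pos e))) (fun ep => ep.2 - tp)
      = (PySem.List.min? (proteins.filter (fun e => decide (pos e ≠ -1 ∧ pos e > tp))) pos).map
          (fun e => (e, pos e)) := by
    rw [pvMin?_map]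
    exact congrArg (Option.map _) (pvMinSubEqMin _ pos tp)
  rw [hsub, hobj]
  by_cases hne : proteins.filter (fun e => decide (pos e ≠ -1 ∧ pos e < tp)) ≠ [] ∧
      proteins.filter (fun e => decide (pos e ≠ -1 ∧ pos e > tp)) ≠ []
  · rw [if_pos hne, if_pos hne]
    cases hS : PySem.List.max? (proteins.filter (fun e => decide (pos e ≠ -1 ∧ pos e < tp))) pos with
    | none => exact absurd ((PySem.List.max?_eq_none_iff _ _).mp hS) hne.1
    | some s =>
      cases hO : PySem.List.min? (proteins.filter (fun e => decide (pos e ≠ -1 ∧ pos e > tp))) pos with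
      | none => exact absurd ((PySem.List.min?_eq_none_iff _ _).mp hO) hne.2
      | some o => simp only [Option.map_some]
  · rw [if_neg hne, if_neg hne]
    rcases not_and_or.mp hne with hb | ha
    · have hbnil : proteins.filter (fun e => decide (pos e ≠ -1 ∧ pos e < tp)) = [] := by
        simpa using hb
      rw [hbnil]
      cases PySem.List.min? (proteins.filter (fun e => decide (pos e ≠ -1 ∧ pos e > tp))) pos <;> rfl
    · have hanil : proteins.filter (fun e => decide (pos e ≠ -1 ∧ pos e > tp)) = [] := by
        simpa using ha
      rw [hanil]
      cases PySem.List.max? (proteins.filter (fun e => decide (pos e ≠ -1 ∧ pos e < tp))) pos <;> rfl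

-- per distinct key, step A on (key, grouped values) is step B
theorem pvStep_eq (rows : List (String × String × List (String × String)))
    (st : List (List (String × String)) × Int) (k : String × String) :
    pvStepA st (k, ((rows.map (fun r => ((r.1, r.2.1), r.2.2))).filter
        (fun p => p.1 == k)).map (fun p => p.2))
    = pvStepB rows st k := by
  unfold pvStepA pvStepB
  simp only []
  by_cases htr : pvHasTrigger k.2 = true
  case neg =>
    have htp : pvTriggerPos k.2 = -1 := by
      by_contra hc
      exact htr ((pvHasTrigger_iff k.2).mpr hc)
    have hb : pvHasTrigger k.2 = false := by simpa using htr
    simp [hb, htp]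
  case pos =>
  have htp : pvTriggerPos k.2 ≠ -1 := (pvHasTrigger_iff k.2).mp htr
  have hproteins :
      (((rows.map (fun r => ((r.1, r.2.1), r.2.2))).filter (fun p => p.1 == k)).map
        (fun p => p.2)).filter (fun e => pvDGet e "type" == "protein")
      = (rows.filter (fun r =>
          ((r.1, r.2.1) == k) && (pvDGet r.2.2 "type" == "protein"))).map (fun r => r.2.2) := by
    simp only [List.filter_map, List.map_map, List.filter_filter, Function.comp]
    congr 1
    apply List.filter_congr
    intro r _
    exact Bool.and_comm _ _
  rw [hproteins]
  simp only [htr, not_true, if_false, if_neg htp]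
  by_cases hlen : ((rows.filter (fun r =>
      ((r.1, r.2.1) == k) && (pvDGet r.2.2 "type" == "protein"))).map (fun r => r.2.2)).length < 2 ∨
      ((rows.filter (fun r =>
      ((r.1, r.2.1) == k) && (pvDGet r.2.2 "type" == "protein"))).map (fun r => r.2.2)).length > 3
  case pos => simp only [hlen, if_true]
  case neg =>
  simp only [hlen, if_false]
  exact pvTail_eq st _ _ _ _ k.1 k.2

-- the outer loop: A over (key, grouped values) items, B over the distinct keys
theorem pvFoldAux (rows : List (String × String × List (String × String)))
    (keys : List (String × String)) (st : List (List (String × String)) × Int) :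
    (keys.map (fun c => (c, ((rows.map (fun r => ((r.1, r.2.1), r.2.2))).filter
        (fun p => p.1 == c)).map (fun p => p.2)))).foldl pvStepA st
    = keys.foldl (pvStepB rows) st := by
  induction keys generalizing st with
  | nil => rfl
  | cons c t ih =>
    simp only [List.map_cons, List.foldl_cons]
    rw [pvStep_eq]
    exact ih _

-- ===== VERDICT (by name: the statement is the Claim_ definition above) =====
theorem build_activates_triples_spec : Claim_equal_build_activates_triples := by
  intro entities valid_document_ids _ _
  unfold Spec_build_activates_triples build_activates_triples build_activates_triples_alt
  rw [pvRows_eq_rowsOf]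
  have hgroup : pvGroup entities valid_document_ids
      = (pvRowsOf entities valid_document_ids).foldl
          (fun d r => d.modify (r.1, r.2.1) [] (· ++ [r.2.2])) PySem.Dict.empty := by
    unfold pvGroup
    exact pvGroup_eq_fold_rows entities valid_document_ids PySem.Dict.empty
  have hkv : (pvRowsOf entities valid_document_ids).foldl
        (fun d r => d.modify (r.1, r.2.1) [] (· ++ [r.2.2])) PySem.Dict.empty
      = ((pvRowsOf entities valid_document_ids).map (fun r => ((r.1, r.2.1), r.2.2))).foldl
          (fun d p => d.modify p.1 [] (· ++ [p.2])) PySem.Dict.empty := by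
    rw [List.foldl_map]
  have hnodup : ((((pvRowsOf entities valid_document_ids).map (fun r => ((r.1, r.2.1), r.2.2))).foldl
      (fun d p => d.modify p.1 [] (· ++ [p.2])) PySem.Dict.empty).keys).Nodup := by
    have := PySem.Dict.nodup_keys_foldl_modify_key
      ((pvRowsOf entities valid_document_ids).map (fun r => ((r.1, r.2.1), r.2.2)))
      (fun p => p.1) [] (fun _ p => fun v => v ++ [p.2]) PySem.Dict.empty (by simp)
    simpa using this
  have hkeys : ((((pvRowsOf entities valid_document_ids).map (fun r => ((r.1, r.2.1), r.2.2))).foldl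
      (fun d p => d.modify p.1 [] (· ++ [p.2])) PySem.Dict.empty)).keys
      = PySem.List.dedup (((pvRowsOf entities valid_document_ids).map
          (fun r => ((r.1, r.2.1), r.2.2))).map (fun p => p.1)) := by
    have := PySem.Dict.keys_foldl_modify_key
      ((pvRowsOf entities valid_document_ids).map (fun r => ((r.1, r.2.1), r.2.2)))
      (fun p => p.1) [] (fun _ p => fun v => v ++ [p.2]) PySem.Dict.empty
    rw [PySem.List.dedup_eq_ofList]
    simpa [PySem.Dict.keys_empty] using this
  have hitems : ((((pvRowsOf entities valid_document_ids).map (fun r => ((r.1, r.2.1), r.2.2))).foldl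
      (fun d p => d.modify p.1 [] (· ++ [p.2])) PySem.Dict.empty)).items
      = (PySem.List.dedup (((pvRowsOf entities valid_document_ids).map
          (fun r => ((r.1, r.2.1), r.2.2))).map (fun p => p.1))).map
          (fun c => (c, (((pvRowsOf entities valid_document_ids).map
            (fun r => ((r.1, r.2.1), r.2.2))).filter (fun p => p.1 == c)).map (fun p => p.2))) := by
    rw [PySem.Dict.items_eq_map_keys _ hnodup [], hkeys]
    apply List.map_congr_left
    intro c _
    have := PySem.Dict.getD_foldl_modify_append
      ((pvRowsOf entities valid_document_ids).map (fun r => ((r.1, r.2.1), r.2.2)))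
      PySem.Dict.empty c
    simp only [PySem.Dict.getD_empty, List.nil_append] at this
    rw [this]
  rw [hgroup, hkv, hitems]
  have hkeysmap : ((pvRowsOf entities valid_document_ids).map
      (fun r => ((r.1, r.2.1), r.2.2))).map (fun p => p.1)
      = (pvRowsOf entities valid_document_ids).map (fun r => (r.1, r.2.1)) := by
    rw [List.map_map]
    rfl
  rw [hkeysmap]
  exact pvFoldAux (pvRowsOf entities valid_document_ids) _ ([], 0)
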